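-- pv_equiv track=rewrite | github.com/gallaway-jp/AnkiTemplateDesigner | gui/anki_bridge.py | scope_css_for_field
-- ===== SOURCE A (Python) =====
-- def scope_css_for_field(css: str, field_name: str) -> str:
--     """
--     Scope CSS to a specific field.
--
--     Args:
--         css: CSS rules
--         field_name: Field name to scope to
--
--     Returns:
--         Scoped CSS
--     """
--     lines = css.strip().split('\n')
--     scoped_lines = []
--
--     for line in lines:
--         if '{' in line:
--             selector = line.split('{')[0].strip()
--             rest = '{' + line.split('{', 1)[1]
--             scoped_lines.append(f'.field-{field_name} {selector} {rest}')
--         else: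
--             scoped_lines.append(line)
--
--     return '\n'.join(scoped_lines)
-- ===== SOURCE B (Python) =====
-- def scope_css_for_field(css: str, field_name: str) -> str:
--     """Scope CSS to a specific field (single character-level scan, no line splitting)."""
--     s = css.strip()
--     out = []
--     i, n = 0, len(s)
--     while i < n:  # i is at the start of a line
--         j = i
--         while j < n and s[j] != '{' and s[j] != '\n':
--             j += 1
--         if j < n and s[j] == '{':
--             out.append('.field-' + field_name + ' ' + s[i:j].strip() + ' {')
--             j += 1
--             k = s.find('\n', j)
--             if k == -1:
--                 out.append(s[j:])
--                 i = n
--             else: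
--                 out.append(s[j:k + 1])
--                 i = k + 1
--         elif j < n:  # s[j] == '\n'
--             out.append(s[i:j + 1])
--             i = j + 1
--         else:
--             out.append(s[i:])
--             i = n
--     return ''.join(out)
-- ===== Notes on version B (the rewrite author's own statement) =====
-- stated objective: alternative
-- what changed: A strips, splits the CSS into lines, re-splits each line on '{' and rejoins with '\n'; B makes a single left-to-right character scan over the stripped CSS with an index (two-pointer prefix scan plus find-next-newline), emitting scoped pieces into one ''.join with no line list or per-line re-splitting.
import Mathlib
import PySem

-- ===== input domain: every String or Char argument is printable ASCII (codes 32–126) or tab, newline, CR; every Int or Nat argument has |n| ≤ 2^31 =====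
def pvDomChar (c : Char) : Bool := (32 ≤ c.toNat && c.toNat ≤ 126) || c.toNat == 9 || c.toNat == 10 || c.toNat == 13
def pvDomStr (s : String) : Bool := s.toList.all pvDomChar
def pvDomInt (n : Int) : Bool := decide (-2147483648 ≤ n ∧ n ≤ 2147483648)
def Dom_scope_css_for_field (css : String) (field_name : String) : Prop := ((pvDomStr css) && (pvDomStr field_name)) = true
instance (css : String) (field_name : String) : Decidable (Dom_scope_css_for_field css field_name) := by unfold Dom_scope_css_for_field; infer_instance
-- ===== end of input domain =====

-- B replaces A's strip / split-into-lines / re-split-each-line / rejoin pipeline by a single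
-- left-to-right character scan over the stripped CSS (objective: alternative, same O(n) cost).

-- ===== PORT A =====
-- literal port of A: strip, split on '\n', per line split on '{' (index [0] and the
-- maxsplit=1 remainder [1] — both indexings are always in range because the splits of a
-- line containing '{' have ≥ 2 parts, so the getD defaults are never used), rejoin.
def scope_css_for_field (css : String) (field_name : String) : String :=
  let lines := PySem.Chars.splitOn (PySem.Chars.strip css.toList) ['\n']
  let out := lines.foldl (fun acc line =>
    if PySem.Chars.isIn ['{'] line then
      let selector := PySem.Chars.strip ((PySem.Chars.splitOn line ['{']).headD [])
      let rest := '{' :: ((PySem.Chars.splitOnMax line ['{'] 1).getD 1 [])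
      acc ++ [".field-".toList ++ field_name.toList ++ [' '] ++ selector ++ [' '] ++ rest]
    else acc ++ [line]) []
  String.ofList (PySem.Chars.join ['\n'] out)

-- ===== PORT B =====
-- Source B's inner `while j < n and s[j] != '{' and s[j] != '\n'` scan is the takeWhile/dropWhile
-- split below; `s.find('\n', j)` + slicing is takeWhile/dropWhile on (· != '\n') — exact,
-- since the slice s[j:k] / s[j:] is precisely the prefix of non-'\n' chars and the scan
-- resumes right after the found '\n'.
def pvIsPlain (c : Char) : Bool := !(c == '{' || c == '\n')

def pvScanB (fn : List Char) (s : List Char) : List Char :=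
  let pre := s.takeWhile pvIsPlain
  match h : s.dropWhile pvIsPlain with
  | [] => pre
  | c :: t =>
    if c == '{' then
      ".field-".toList ++ fn ++ [' '] ++ PySem.Chars.strip pre ++ [' '] ++ '{' ::
        (match h2 : t.dropWhile (· != '\n') with
         | [] => t.takeWhile (· != '\n')
         | d :: t2 => t.takeWhile (· != '\n') ++ d :: pvScanB fn t2)
    else pre ++ c :: pvScanB fn t
termination_by s.length
decreasing_by
  · have h1 : t.length < s.length := by
      have := (List.dropWhile_sublist (l := s) (p := pvIsPlain)).length_le
      rw [h] at this; simp at this; omega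
    have h3 : t2.length < t.length + 1 := by
      have := (List.dropWhile_sublist (l := t) (p := (· != '\n'))).length_le
      rw [h2] at this; simp at this; omega
    omega
  · have := (List.dropWhile_sublist (l := s) (p := pvIsPlain)).length_le
    rw [h] at this; simp at this; omega

def scope_css_for_field_alt (css : String) (field_name : String) : String :=
  String.ofList (pvScanB field_name.toList (PySem.Chars.strip css.toList))

-- ===== PRECONDITION & SPEC =====
def Spec_scope_css_for_field (css : String) (field_name : String) (out : String) : Prop := out = scope_css_for_field_alt css field_name
instance (css : String) (field_name : String) (out : String) : Decidable (Spec_scope_css_for_field css field_name out) := by unfold Spec_scope_css_for_field; infer_instance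

-- ===== CLAIM (what is proved, stated in full; the proofs are below) =====
def Claim_equal_scope_css_for_field : Prop := ∀ (css : String) (field_name : String), Dom_scope_css_for_field css field_name → Spec_scope_css_for_field css field_name (scope_css_for_field css field_name)

-- ===== LEMMAS AND PROOFS =====

-- splitting on a single character, structurally
def pvSplit1 (a : Char) : List Char → List (List Char)
  | [] => [[]]
  | c :: t => if c == a then [] :: pvSplit1 a t else (pvSplit1 a t).modifyHead (c :: ·)

theorem pvSplit1_ne_nil (a : Char) (l : List Char) : pvSplit1 a l ≠ [] := by
  induction l with
  | nil => simp [pvSplit1]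
  | cons c t ih =>
    simp only [pvSplit1]
    split
    · simp
    · intro h
      exact ih (List.modifyHead_eq_nil_iff.mp h)

theorem pvSplit1_append (a : Char) (p r : List Char) (hp : ∀ c ∈ p, (c == a) = false) :
    pvSplit1 a (p ++ r) = (pvSplit1 a r).modifyHead (p ++ ·) := by
  induction p with
  | nil =>
    obtain ⟨x, xs, hx⟩ := List.exists_cons_of_ne_nil (pvSplit1_ne_nil a r)
    simp [hx]
  | cons c t ih =>
    have hc := hp c (by simp)
    simp only [List.cons_append, pvSplit1, hc, Bool.false_eq_true, if_false]
    rw [ih (fun x hx => hp x (by simp [hx]))]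
    rw [List.modifyHead_modifyHead]
    rfl

theorem pvSplit1_head (a : Char) (l : List Char) :
    (pvSplit1 a l).headD [] = l.takeWhile (· != a) := by
  induction l with
  | nil => simp [pvSplit1]
  | cons c t ih =>
    simp only [pvSplit1, List.takeWhile_cons]
    by_cases hc : c = a
    · simp [hc]
    · have : (c == a) = false := by simp [hc]
      simp only [this, Bool.false_eq_true, if_false, bne, Bool.not_false]
      obtain ⟨x, xs, hx⟩ := List.exists_cons_of_ne_nil (pvSplit1_ne_nil a t)
      rw [hx] at ih ⊢
      simp at ih
      simp [ih]
      rfl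

theorem pv_modifyHead_fun_id {α : Type} (l : List α) : List.modifyHead (fun x => x) l = l := by
  cases l <;> rfl

theorem pv_modifyHead_ext {α : Type} (f g : α → α) (l : List α) (h : ∀ x, f x = g x) :
    List.modifyHead f l = List.modifyHead g l := by
  cases l <;> simp [h]

theorem pv_go_spec (a : Char) (fuel : Nat) (l cur : List Char) (acc : List (List Char))
    (hf : l.length ≤ fuel) :
    PySem.Chars.splitOn.go [a] fuel l cur acc
      = acc.reverse ++ (pvSplit1 a l).modifyHead (cur.reverse ++ ·) := by
  induction fuel generalizing l cur acc with
  | zero =>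
    have : l = [] := by cases l <;> simp_all
    subst this
    rw [PySem.Chars.splitOn.go]
    simp [pvSplit1]
  | succ fuel ih =>
    cases l with
    | nil => rw [PySem.Chars.splitOn.go] <;> simp [pvSplit1]
    | cons c rest =>
      rw [PySem.Chars.splitOn.go]
      by_cases hc : a = c
      · subst hc
        simp only [List.isPrefixOf, BEq.rfl, Bool.true_and, if_true]
        simp only [List.length_cons, List.length_nil, List.drop_succ_cons, List.drop_zero]
        rw [ih rest [] (cur.reverse :: acc) (by simp at hf; omega)]
        simp [pvSplit1, pv_modifyHead_fun_id]
      · have hcc : (a == c) = false := by simp [hc]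
        simp only [List.isPrefixOf, hcc, Bool.false_and, Bool.false_eq_true, if_false]
        rw [ih rest (c :: cur) acc (by simp at hf; omega)]
        have hcc' : (c == a) = false := by simp [Ne.symm hc]
        simp only [pvSplit1, hcc', Bool.false_eq_true, if_false]
        rw [List.modifyHead_modifyHead]
        congr 1
        apply pv_modifyHead_ext
        intro x
        simp

theorem pv_splitOn_singleton (a : Char) (l : List Char) :
    PySem.Chars.splitOn l [a] = pvSplit1 a l := by
  rw [PySem.Chars.splitOn, pv_go_spec a (l.length+1) l [] [] (by omega)]
  simp [pv_modifyHead_fun_id]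

theorem pv_goMax0 (a : Char) (fuel : Nat) (l cur : List Char) (acc : List (List Char)) :
    PySem.Chars.splitOnMax.go [a] fuel 0 l cur acc = acc.reverse ++ [cur.reverse ++ l] := by
  cases fuel with
  | zero => rw [PySem.Chars.splitOnMax.go]; simp
  | succ fuel =>
    cases l with
    | nil => rw [PySem.Chars.splitOnMax.go] <;> simp
    | cons c rest => rw [PySem.Chars.splitOnMax.go]; simp

theorem pv_goMax1 (a : Char) (fuel : Nat) (l cur : List Char) (acc : List (List Char))
    (hf : l.length ≤ fuel) :
    PySem.Chars.splitOnMax.go [a] fuel 1 l cur acc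
      = acc.reverse ++ (if a ∈ l then [cur.reverse ++ l.takeWhile (· != a), (l.dropWhile (· != a)).tail]
                        else [cur.reverse ++ l]) := by
  induction fuel generalizing l cur acc with
  | zero =>
    have : l = [] := by cases l <;> simp_all
    subst this
    rw [PySem.Chars.splitOnMax.go]
    simp
  | succ fuel ih =>
    cases l with
    | nil => rw [PySem.Chars.splitOnMax.go] <;> simp
    | cons c rest =>
      rw [PySem.Chars.splitOnMax.go]
      by_cases hc : a = c
      · subst hc
        simp only [List.isPrefixOf, BEq.rfl, Bool.true_and, if_true]
        simp only [List.length_cons, List.length_nil, List.drop_succ_cons, List.drop_zero,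
          Nat.sub_self]
        rw [pv_goMax0]
        simp
      · have hcc : (a == c) = false := by simp [hc]
        have hcc' : (c == a) = false := by simp [Ne.symm hc]
        simp only [List.isPrefixOf, hcc, Bool.false_and, Bool.false_eq_true, if_false,
          Nat.one_ne_zero]
        rw [ih rest (c :: cur) acc (by simp at hf; omega)]
        by_cases hm : a ∈ rest
        · simp [hm, hc, Ne.symm hc, List.dropWhile_cons]
        · simp [hm, hc]

theorem pv_splitOnMax_one (a : Char) (l : List Char) (h : a ∈ l) :
    PySem.Chars.splitOnMax l [a] 1 = [l.takeWhile (· != a), (l.dropWhile (· != a)).tail] := by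
  rw [PySem.Chars.splitOnMax]
  simp only [show ¬((1:Int) < 0) from by norm_num, if_false]
  rw [show (1:Int).toNat = 1 from rfl, pv_goMax1 a (l.length+1) l [] [] (by omega)]
  simp [h]

theorem pv_isIn_singleton (a : Char) (l : List Char) :
    PySem.Chars.isIn [a] l = true ↔ a ∈ l := by
  rw [PySem.Chars.isIn_iff_infix]
  constructor
  · intro hinf
    exact hinf.subset (by simp)
  · intro hm
    obtain ⟨p, q, hpq⟩ := List.append_of_mem hm
    exact ⟨p, q, by rw [hpq]; simp⟩

-- the per-line transform both programs implement
def pvLineG (fn : List Char) (line : List Char) : List Char :=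
  if '{' ∈ line then
    ".field-".toList ++ fn ++ [' '] ++ PySem.Chars.strip (line.takeWhile (· != '{')) ++ [' ']
      ++ '{' :: (line.dropWhile (· != '{')).tail
  else line

theorem pv_takeWhile_append (q : Char → Bool) (p : List Char) (c : Char) (r : List Char)
    (hp : ∀ x ∈ p, q x = true) (hc : q c = false) :
    (p ++ c :: r).takeWhile q = p := by
  induction p with
  | nil => simp [hc]
  | cons x xs ih =>
    simp only [List.cons_append, List.takeWhile_cons, hp x (by simp), if_true]
    rw [ih (fun y hy => hp y (by simp [hy]))]

theorem pv_dropWhile_append (q : Char → Bool) (p : List Char) (c : Char) (r : List Char)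
    (hp : ∀ x ∈ p, q x = true) (hc : q c = false) :
    (p ++ c :: r).dropWhile q = c :: r := by
  induction p with
  | nil => simp [hc]
  | cons x xs ih =>
    simp only [List.cons_append, List.dropWhile_cons, hp x (by simp), if_true]
    exact ih (fun y hy => hp y (by simp [hy]))

theorem pv_split1_nosep (a : Char) (s : List Char) (h : ∀ c ∈ s, (c == a) = false) :
    pvSplit1 a s = [s] := by
  have := pvSplit1_append a s [] h
  simpa [pvSplit1] using this

theorem pv_split1_chunk (a : Char) (p r : List Char) (h : ∀ c ∈ p, (c == a) = false) :
    pvSplit1 a (p ++ a :: r) = p :: pvSplit1 a r := by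
  rw [pvSplit1_append a p (a :: r) h]
  simp [pvSplit1]

theorem pv_A_as_map (css field_name : String) :
    scope_css_for_field css field_name
      = String.ofList (PySem.Chars.join ['\n']
          ((pvSplit1 '\n' (PySem.Chars.strip css.toList)).map (pvLineG field_name.toList))) := by
  have hfun : (fun (acc : List (List Char)) line =>
      if PySem.Chars.isIn ['{'] line then
        acc ++ [".field-".toList ++ field_name.toList ++ [' ']
          ++ PySem.Chars.strip ((PySem.Chars.splitOn line ['{']).headD []) ++ [' ']
          ++ '{' :: ((PySem.Chars.splitOnMax line ['{'] 1).getD 1 [])]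
      else acc ++ [line])
      = fun acc line => acc ++ [pvLineG field_name.toList line] := by
    funext acc line
    by_cases hb : PySem.Chars.isIn ['{'] line = true
    · have hm : '{' ∈ line := (pv_isIn_singleton _ _).mp hb
      rw [if_pos hb]
      rw [pv_splitOn_singleton, pvSplit1_head, pv_splitOnMax_one _ _ hm]
      unfold pvLineG
      rw [if_pos hm]
      rfl
    · have hm : '{' ∉ line := fun h => hb ((pv_isIn_singleton _ _).mpr h)
      rw [if_neg hb]
      unfold pvLineG
      rw [if_neg hm]
  unfold scope_css_for_field
  rw [pv_splitOn_singleton]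
  simp only [hfun, PySem.List.foldl_append_singleton_eq_map, List.nil_append]

theorem pv_plain_ne (c : Char) (h : pvIsPlain c = true) : c ≠ '{' ∧ c ≠ '\n' := by
  simp [pvIsPlain] at h
  exact h

theorem pv_scan_eq (fn s : List Char) :
    pvScanB fn s = PySem.Chars.join ['\n'] ((pvSplit1 '\n' s).map (pvLineG fn)) := by
  fun_induction pvScanB fn s with
  | case1 s pre h =>
    have hs : List.takeWhile pvIsPlain s = s := by
      conv_rhs => rw [← List.takeWhile_append_dropWhile (p := pvIsPlain) (l := s)]
      rw [h, List.append_nil]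
    have hall : ∀ c ∈ s, pvIsPlain c = true := by
      intro c hc
      rw [← hs] at hc
      exact List.mem_takeWhile_imp hc
    have h1 : ∀ c ∈ s, (c == '\n') = false := by
      intro c hc
      simp [(pv_plain_ne c (hall c hc)).2]
    have hnb : '{' ∉ s := fun hm => (pv_plain_ne '{' (hall _ hm)).1 rfl
    rw [pv_split1_nosep _ _ h1]
    simp only [List.map_cons, List.map_nil, PySem.Chars.join_singleton]
    rw [pvLineG, if_neg hnb]
    exact hs
  | case2 s pre c t h hc ih =>
    have hceq : c = '{' := by simpa using hc
    subst hceq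
    have hs : s = List.takeWhile pvIsPlain s ++ '{' :: t := by
      conv_lhs => rw [← List.takeWhile_append_dropWhile (p := pvIsPlain) (l := s)]
      rw [h]
    have hpre : ∀ x ∈ List.takeWhile pvIsPlain s, pvIsPlain x = true :=
      fun x hx => List.mem_takeWhile_imp hx
    have hpre_nb : ∀ x ∈ List.takeWhile pvIsPlain s, (x != '{') = true := by
      intro x hx
      simp [(pv_plain_ne x (hpre x hx)).1]
    have hpre_nn : ∀ x ∈ List.takeWhile pvIsPlain s, (x == '\n') = false := by
      intro x hx
      simp [(pv_plain_ne x (hpre x hx)).2]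
    split
    · -- no further newline: the rest of the input is a single line
      rename_i h2
      have htake : List.takeWhile (fun x => x != '\n') t = t := by
        conv_rhs => rw [← List.takeWhile_append_dropWhile (p := (fun x => x != '\n')) (l := t)]
        rw [h2, List.append_nil]
      have htall : ∀ x ∈ t, (x == '\n') = false := by
        intro x hx
        rw [← htake] at hx
        have := List.mem_takeWhile_imp hx
        simpa using this
      have hnn : ∀ x ∈ s, (x == '\n') = false := by
        intro x hx
        rw [hs] at hx
        rcases List.mem_append.mp hx with hx | hx
        · exact hpre_nn x hx
        · rcases List.mem_cons.mp hx with hx | hx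
          · simp [hx]
          · exact htall x hx
      rw [show pvSplit1 '\n' s = [s] from pv_split1_nosep _ _ hnn]
      simp only [List.map_cons, List.map_nil, PySem.Chars.join_singleton]
      have hmem : '{' ∈ s := by rw [hs]; simp
      rw [pvLineG, if_pos hmem]
      conv_rhs => rw [hs]
      rw [pv_takeWhile_append _ _ _ _ hpre_nb (by simp),
          pv_dropWhile_append _ _ _ _ hpre_nb (by simp)]
      simp [htake]
      rfl
    · -- a newline follows: scoped first line ++ '\n' ++ recursion on the tail
      rename_i d t2 h2
      have hd : d = '\n' := by
        have hne : List.dropWhile (fun x => x != '\n') t ≠ [] := by rw [h2]; simp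
        have hnot := List.head_dropWhile_not (fun x => x != '\n') hne
        have hhead : (List.dropWhile (fun x => x != '\n') t).head hne = d := by
          simp [h2]
        rw [hhead] at hnot
        simpa using hnot
      subst hd
      have ht : t = List.takeWhile (fun x => x != '\n') t ++ '\n' :: t2 := by
        conv_lhs => rw [← List.takeWhile_append_dropWhile (p := (fun x => x != '\n')) (l := t)]
        rw [h2]
      have hbody : ∀ x ∈ List.takeWhile (fun x => x != '\n') t, (x == '\n') = false := by
        intro x hx
        have := List.mem_takeWhile_imp hx
        simpa using this
      have hs2 : s = (List.takeWhile pvIsPlain s ++ '{' :: List.takeWhile (fun x => x != '\n') t)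
          ++ '\n' :: t2 := by
        conv_lhs => rw [hs, ht]
        simp
      have hchunk : ∀ x ∈ List.takeWhile pvIsPlain s ++ '{' :: List.takeWhile (fun x => x != '\n') t,
          (x == '\n') = false := by
        intro x hx
        rcases List.mem_append.mp hx with hx | hx
        · exact hpre_nn x hx
        · rcases List.mem_cons.mp hx with hx | hx
          · simp [hx]
          · exact hbody x hx
      rw [hs2, pv_split1_chunk _ _ _ hchunk]
      obtain ⟨x, xs, hx⟩ := List.exists_cons_of_ne_nil (pvSplit1_ne_nil '\n' t2)
      rw [hx]
      simp only [List.map_cons]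
      rw [PySem.Chars.join_cons_cons]
      rw [← List.map_cons, ← hx, ← ih '\n' t2 h2]
      have hmem : '{' ∈ List.takeWhile pvIsPlain s ++ '{' :: List.takeWhile (fun x => x != '\n') t := by simp
      rw [pvLineG, if_pos hmem]
      rw [pv_takeWhile_append _ _ _ _ hpre_nb (by simp),
          pv_dropWhile_append _ _ _ _ hpre_nb (by simp)]
      simp
      rfl
  | case3 s pre c t h hc ih =>
    have hd : pvIsPlain c = false := by
      have hne : List.dropWhile pvIsPlain s ≠ [] := by rw [h]; simp
      have hnot := List.head_dropWhile_not pvIsPlain hne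
      have hhead : (List.dropWhile pvIsPlain s).head hne = c := by simp [h]
      rw [hhead] at hnot
      exact hnot
    have hceq : c = '\n' := by
      simp [pvIsPlain] at hd
      exact hd (by simpa using hc)
    subst hceq
    have hs : s = List.takeWhile pvIsPlain s ++ '\n' :: t := by
      conv_lhs => rw [← List.takeWhile_append_dropWhile (p := pvIsPlain) (l := s)]
      rw [h]
    have hpre : ∀ x ∈ List.takeWhile pvIsPlain s, pvIsPlain x = true :=
      fun x hx => List.mem_takeWhile_imp hx
    have hpre_nn : ∀ x ∈ List.takeWhile pvIsPlain s, (x == '\n') = false := by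
      intro x hx
      simp [(pv_plain_ne x (hpre x hx)).2]
    have hnb : '{' ∉ List.takeWhile pvIsPlain s :=
      fun hm => (pv_plain_ne '{' (hpre _ hm)).1 rfl
    rw [hs, pv_split1_chunk _ _ _ hpre_nn]
    obtain ⟨x, xs, hx⟩ := List.exists_cons_of_ne_nil (pvSplit1_ne_nil '\n' t)
    rw [hx]
    simp only [List.map_cons]
    rw [PySem.Chars.join_cons_cons]
    rw [← List.map_cons, ← hx, ← ih]
    rw [pvLineG, if_neg hnb]
    simp
    rfl

-- ===== VERDICT (by name: the statement is the Claim_ definition above) =====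
theorem scope_css_for_field_spec : Claim_equal_scope_css_for_field := by
  intro css field_name _
  unfold Spec_scope_css_for_field scope_css_for_field_alt
  rw [pv_A_as_map, pv_scan_eq]
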